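-- pv_equiv track=rewrite | github.com/Face1essboy/OpenSearch-SQL | src/runner/column_retrieve.py | get_tab_col_dic
-- ===== SOURCE A (Python) =====
-- def get_tab_col_dic(table_list):
--     """
--     将'表.列'形式转为{'列名': set(table.col)}，方便后续只按列名检索，再按表补全所有同名列。
--     :param table_list: list[str]，原始形如'table.column'的列全名。
--     :return: dict[str, set[str]]，映射关系。
--     """
--     tab_dic = {}
--     for x in table_list:
--         t, col = x.split(".")
--         col = col.strip('`')  # 去除反引号更通用
--         tab_dic.setdefault(col, set())
--         tab_dic[col].add(x)
--     return tab_dic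
-- ===== SOURCE B (Python) =====
-- def get_tab_col_dic(table_list):
--     # alternative decomposition: derive the key function, list the distinct
--     # column names in first-seen order, then collect each group by one scan.
--     def key(x):
--         t, col = x.split(".")
--         return col.strip('`')
--     keys = list(dict.fromkeys(key(x) for x in table_list))
--     return {k: set(x for x in table_list if key(x) == k) for k in keys}
-- ===== Notes on version B (the rewrite author's own statement) =====
-- stated objective: alternative
-- what changed: Replaces the single-pass setdefault/add dict accumulation with a two-phase decomposition: an explicit key function, an ordered dedup of the keys, then a per-key scan building each group as a comprehension.
import Mathlib
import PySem

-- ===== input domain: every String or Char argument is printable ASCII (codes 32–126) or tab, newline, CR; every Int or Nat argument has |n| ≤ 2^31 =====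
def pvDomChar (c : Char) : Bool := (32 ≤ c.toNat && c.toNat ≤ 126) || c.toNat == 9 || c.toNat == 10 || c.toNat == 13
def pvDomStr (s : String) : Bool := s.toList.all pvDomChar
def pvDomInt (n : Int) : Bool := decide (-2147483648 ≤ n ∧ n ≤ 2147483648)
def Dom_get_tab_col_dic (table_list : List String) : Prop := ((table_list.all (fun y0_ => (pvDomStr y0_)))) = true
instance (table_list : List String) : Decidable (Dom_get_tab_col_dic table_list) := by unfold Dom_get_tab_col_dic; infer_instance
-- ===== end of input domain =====

-- B restructures A's single-pass setdefault/add accumulation into a key function,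
-- an ordered dedup of the keys and one per-key collecting scan; same results.

-- ===== PORT A =====
-- tab_dic.setdefault(col, set()); tab_dic[col].add(x)  →  setdefault then modify
def get_tab_col_dic (table_list : List String) : List (String × List String) :=
  (table_list.foldl (fun tab_dic x =>
      match PySem.Str.split? x "." with
      | some [_t, col0] =>
          let col := PySem.Str.stripChars col0 "`"
          let tab_dic := tab_dic.setdefault col PySem.Set.empty
          tab_dic.modify col PySem.Set.empty (fun s => PySem.Set.add s x)
      | _ => tab_dic    -- Python raises ValueError here; excluded by Pre_
      ) PySem.Dict.empty).items

-- ===== PORT B =====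
-- key(x): t, col = x.split("."); return col.strip('`')  (none = ValueError, excluded by Pre_)
def pvKey (x : String) : Option String :=
  let parts := (PySem.Str.split? x ".").getD []
  if h : parts.length = 2 then some (PySem.Str.stripChars parts[1] "`") else none

def get_tab_col_dic_alt (table_list : List String) : List (String × List String) :=
  let keys := PySem.List.dedup (table_list.filterMap pvKey)
  keys.map (fun k => (k, PySem.Set.ofList (table_list.filter (fun x => pvKey x == some k))))

-- ===== PRECONDITION & SPEC =====
-- A (and B) raise ValueError on any element that does not split on "." into exactly two parts.
def Pre_get_tab_col_dic (table_list : List String) : Prop :=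
  ∀ x ∈ table_list, ((PySem.Str.split? x ".").getD []).length = 2
instance (table_list : List String) : Decidable (Pre_get_tab_col_dic table_list) := by
  unfold Pre_get_tab_col_dic; infer_instance
def pvWitness_get_tab_col_dic : List String := ["t.`c`", "u.c", "v.d", "t.c"]

def Spec_get_tab_col_dic (table_list : List String) (out : List (String × List String)) : Prop := out = get_tab_col_dic_alt table_list
instance (table_list : List String) (out : List (String × List String)) : Decidable (Spec_get_tab_col_dic table_list out) := by unfold Spec_get_tab_col_dic; infer_instance

-- ===== CLAIM (what is proved, stated in full; the proofs are below) =====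
def Claim_equal_get_tab_col_dic : Prop := ∀ (table_list : List String), Dom_get_tab_col_dic table_list → Pre_get_tab_col_dic table_list → Spec_get_tab_col_dic table_list (get_tab_col_dic table_list)

-- ===== LEMMAS AND PROOFS =====

-- A's loop body, named for the lemmas
def pvStep (tab_dic : PySem.Dict String (PySem.Set String)) (x : String) :
    PySem.Dict String (PySem.Set String) :=
  match PySem.Str.split? x "." with
  | some [_t, col0] =>
      let col := PySem.Str.stripChars col0 "`"
      let tab_dic := tab_dic.setdefault col PySem.Set.empty
      tab_dic.modify col PySem.Set.empty (fun s => PySem.Set.add s x)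
  | _ => tab_dic

lemma pv_key_isSome {x : String} (h : ((PySem.Str.split? x ".").getD []).length = 2) :
    ∃ c, pvKey x = some c := by
  unfold pvKey
  simp [h]

lemma pvStep_of_key {x : String} {c : String} (h : pvKey x = some c)
    (d : PySem.Dict String (PySem.Set String)) :
    pvStep d x = (d.setdefault c PySem.Set.empty).modify c PySem.Set.empty
      (fun s => PySem.Set.add s x) := by
  unfold pvStep
  unfold pvKey at h
  rcases hs : PySem.Str.split? x "." with _ | ⟨_ | ⟨t, _ | ⟨col, _ | _⟩⟩⟩ <;>
    simp [hs] at h ⊢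
  simp [h]

lemma pvStep_keys {x c : String} (h : pvKey x = some c)
    (d : PySem.Dict String (PySem.Set String)) :
    (pvStep d x).keys = PySem.Set.add d.keys c := by
  rw [pvStep_of_key h]
  by_cases hc : d.contains c
  · have hm : c ∈ d.keys := by
      rw [PySem.Dict.contains_eq_decide_mem_keys] at hc; simpa using hc
    rw [PySem.Dict.setdefault_of_contains _ _ hc, PySem.Dict.keys_modify,
      PySem.Dict.keys_insert_of_contains _ _ hc]
    simp [PySem.Set.add, hm]
  · have hc' : d.contains c = false := by simpa using hc
    have hm : c ∉ d.keys := by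
      rw [PySem.Dict.contains_eq_decide_mem_keys] at hc; simpa using hc
    rw [PySem.Dict.setdefault_of_not_contains _ _ hc', PySem.Dict.keys_modify]
    have hcc : (d.insert c PySem.Set.empty).contains c = true :=
      PySem.Dict.contains_insert_self _ _ _
    rw [PySem.Dict.keys_insert_of_contains _ _ hcc,
      PySem.Dict.keys_insert_of_not_contains _ _ hc']
    simp [PySem.Set.add, hm]

lemma pvStep_getD {x c : String} (h : pvKey x = some c)
    (d : PySem.Dict String (PySem.Set String)) (k : String) :
    (pvStep d x).getD k PySem.Set.empty =
      if k = c then PySem.Set.add (d.getD c PySem.Set.empty) x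
      else d.getD k PySem.Set.empty := by
  rw [pvStep_of_key h, PySem.Dict.getD_modify]
  by_cases hc : d.contains c
  · rw [PySem.Dict.setdefault_of_contains _ _ hc]
  · have hc' : d.contains c = false := by simpa using hc
    rw [PySem.Dict.setdefault_of_not_contains _ _ hc']
    by_cases hk : k = c <;>
      simp [hk, PySem.Dict.getD_insert, PySem.Dict.getD_of_not_contains _ _ hc']

lemma pv_foldl_keys (l : List String)
    (h : ∀ x ∈ l, ((PySem.Str.split? x ".").getD []).length = 2)
    (d : PySem.Dict String (PySem.Set String)) :
    (l.foldl pvStep d).keys = PySem.Set.update d.keys (l.filterMap pvKey) := by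
  induction l generalizing d with
  | nil => simp [PySem.Set.update]
  | cons x rest ih =>
      obtain ⟨c, hc⟩ := pv_key_isSome (h x (by simp))
      rw [List.foldl_cons, ih (fun y hy => h y (by simp [hy])),
        List.filterMap_cons_some hc, pvStep_keys hc, PySem.Set.update_cons]

lemma pv_foldl_getD (l : List String)
    (h : ∀ x ∈ l, ((PySem.Str.split? x ".").getD []).length = 2)
    (d : PySem.Dict String (PySem.Set String)) (k : String) :
    (l.foldl pvStep d).getD k PySem.Set.empty =
      PySem.Set.update (d.getD k PySem.Set.empty)
        (l.filter (fun x => pvKey x == some k)) := by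
  induction l generalizing d with
  | nil => simp [PySem.Set.update]
  | cons x rest ih =>
      obtain ⟨c, hc⟩ := pv_key_isSome (h x (by simp))
      rw [List.foldl_cons, ih (fun y hy => h y (by simp [hy]))]
      by_cases hk : k = c
      · subst hk
        rw [pvStep_getD hc, if_pos rfl, List.filter_cons_of_pos (by simp [hc]),
          PySem.Set.update_cons]
      · rw [pvStep_getD hc, if_neg hk,
          List.filter_cons_of_neg (by simp [hc]; exact fun e => hk e.symm)]

lemma pv_foldl_nodup_keys (l : List String)
    (d : PySem.Dict String (PySem.Set String)) (hd : d.keys.Nodup) :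
    (l.foldl pvStep d).keys.Nodup := by
  induction l generalizing d with
  | nil => simpa
  | cons x rest ih =>
      refine ih _ ?_
      unfold pvStep
      rcases PySem.Str.split? x "." with _ | ⟨_ | ⟨t, _ | ⟨col, _ | _⟩⟩⟩ <;>
        try exact hd
      by_cases hc : d.contains (PySem.Str.stripChars col "`") <;>
        simp [PySem.Dict.setdefault_of_contains, PySem.Dict.setdefault_of_not_contains, hc,
          PySem.Dict.keys_modify, PySem.Dict.nodup_keys_insert, hd]

-- ===== VERDICT (by name: the statement is the Claim_ definition above) =====
theorem get_tab_col_dic_spec : Claim_equal_get_tab_col_dic := by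
  intro tl _ hpre
  unfold Spec_get_tab_col_dic get_tab_col_dic get_tab_col_dic_alt
  have hstep : (fun (tab_dic : PySem.Dict String (PySem.Set String)) (x : String) =>
      match PySem.Str.split? x "." with
      | some [_t, col0] =>
          let col := PySem.Str.stripChars col0 "`"
          let tab_dic := tab_dic.setdefault col PySem.Set.empty
          tab_dic.modify col PySem.Set.empty (fun s => PySem.Set.add s x)
      | _ => tab_dic) = pvStep := rfl
  rw [hstep]
  rw [PySem.Dict.items_eq_map_keys _ (pv_foldl_nodup_keys tl _ (by simp)) PySem.Set.empty]
  rw [pv_foldl_keys tl hpre]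
  simp only [PySem.Dict.keys_empty, PySem.List.dedup_eq_ofList]
  refine List.map_congr_left (fun k _ => ?_)
  rw [pv_foldl_getD tl hpre, PySem.Dict.getD_empty, PySem.Set.update_empty]
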